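-- pv_equiv track=rewrite | github.com/morgang213/cs-pro | email_analyzer.py | _has_random_pattern
-- ===== SOURCE A (Python) =====
-- def _has_random_pattern(text):
--     """
--     Check if text appears randomly generated
--     """
--     # Simple heuristic: alternating consonants and vowels or too many consonants
--     vowels = 'aeiou'
--     consonants = 'bcdfghjklmnpqrstvwxyz'
--
--     if len(text) < 5:
--         return False
--
--     # Count consecutive consonants
--     max_consecutive_consonants = 0
--     current_consecutive = 0
--
--     for char in text.lower():
--         if char in consonants:
--             current_consecutive += 1
--             max_consecutive_consonants = max(max_consecutive_consonants, current_consecutive)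
--         else:
--             current_consecutive = 0
--
--     return max_consecutive_consonants > 4
-- ===== SOURCE B (Python) =====
-- def _has_random_pattern(text):
--     """
--     Check if text appears randomly generated
--     """
--     consonants = 'bcdfghjklmnpqrstvwxyz'
--
--     if len(text) < 5:
--         return False
--
--     # Mask every non-consonant as a space, then the maximal consonant
--     # clusters are exactly the whitespace-separated words.
--     cleaned = ''.join(c if c in consonants else ' ' for c in text.lower())
--     return any(len(run) > 4 for run in cleaned.split())
-- ===== Notes on version B (the rewrite author's own statement) =====
-- stated objective: idiomatic
-- what changed: B replaces A's streaming max-of-consecutive-consonants counter by masking every non-consonant to a space and asking whether any whitespace-separated word of the masked string (i.e. any maximal consonant cluster) is longer than 4.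
import Mathlib
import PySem

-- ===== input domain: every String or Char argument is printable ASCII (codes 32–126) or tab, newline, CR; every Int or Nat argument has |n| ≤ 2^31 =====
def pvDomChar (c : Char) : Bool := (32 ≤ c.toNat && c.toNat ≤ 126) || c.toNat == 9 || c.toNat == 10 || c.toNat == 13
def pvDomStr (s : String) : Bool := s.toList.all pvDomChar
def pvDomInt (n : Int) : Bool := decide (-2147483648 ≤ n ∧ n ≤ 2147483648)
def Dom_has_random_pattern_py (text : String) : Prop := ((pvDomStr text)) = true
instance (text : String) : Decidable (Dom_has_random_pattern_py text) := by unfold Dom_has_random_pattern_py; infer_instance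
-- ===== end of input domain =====

-- B masks non-consonants to spaces and inspects the resulting words instead of A's
-- running consecutive-consonant counter; same cost, more declarative (objective: idiomatic).

-- the shared constant string 'bcdfghjklmnpqrstvwxyz' (a 1-char 'c in consonants' test
-- is exactly list membership of the char)
def pvConsonants : List Char :=
  ['b','c','d','f','g','h','j','k','l','m','n','p','q','r','s','t','v','w','x','y','z']

-- ===== PORT A =====
def has_random_pattern_py (text : String) : Bool :=
  if PySem.Str.len text < 5 then false
  else
    let r := (PySem.Str.lower text).toList.foldl
      (fun (p : Int × Int) c =>
        if pvConsonants.contains c then (max p.1 (p.2 + 1), p.2 + 1) else (p.1, 0))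
      (0, 0)
    decide (4 < r.1)

-- ===== PORT B =====
def has_random_pattern_py_alt (text : String) : Bool :=
  if PySem.Str.len text < 5 then false
  else
    let cleaned : List Char :=
      (PySem.Str.lower text).toList.map (fun c => if pvConsonants.contains c then c else ' ')
    (PySem.Chars.split₀ cleaned).any (fun w => decide (4 < w.length))

-- ===== PRECONDITION & SPEC =====
def Spec_has_random_pattern_py (text : String) (out : Bool) : Prop := out = has_random_pattern_py_alt text
instance (text : String) (out : Bool) : Decidable (Spec_has_random_pattern_py text out) := by unfold Spec_has_random_pattern_py; infer_instance

-- ===== CLAIM (what is proved, stated in full; the proofs are below) =====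
def Claim_equal_has_random_pattern_py : Prop := ∀ (text : String), Dom_has_random_pattern_py text → Spec_has_random_pattern_py text (has_random_pattern_py text)

-- ===== LEMMAS AND PROOFS =====

set_option maxRecDepth 4000 in
theorem pvCons_not_space (c : Char) (h : pvConsonants.contains c = true) :
    PySem.Chars.isspace c = false := by
  have h' : c ∈ pvConsonants := by simpa using h
  simp only [pvConsonants, List.mem_cons, List.not_mem_nil, or_false] at h'
  rcases h' with rfl|rfl|rfl|rfl|rfl|rfl|rfl|rfl|rfl|rfl|rfl|rfl|rfl|rfl|rfl|rfl|rfl|rfl|rfl|rfl|rfl <;> decide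

theorem pvGo_acc (s : List Char) : ∀ (cur : List Char) (acc : List (List Char)),
    PySem.Chars.split₀.go s cur acc = acc.reverse ++ PySem.Chars.split₀.go s cur [] := by
  induction s with
  | nil =>
      intro cur acc
      rw [PySem.Chars.split₀.go.eq_1, PySem.Chars.split₀.go.eq_1]
      by_cases h : cur.isEmpty <;> simp [h]
  | cons c s ih =>
      intro cur acc
      rw [PySem.Chars.split₀.go.eq_2, PySem.Chars.split₀.go.eq_2]
      by_cases hs : PySem.Chars.isspace c
      · by_cases h : cur.isEmpty
        · simp only [hs, h, if_true]
          exact ih [] acc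
        · simp only [hs, h, if_true, if_false, Bool.false_eq_true]
          rw [ih [] (cur.reverse :: acc), ih [] [cur.reverse]]
          simp
      · simp only [hs, Bool.false_eq_true, if_false]
        rw [ih (c :: cur) acc]

theorem pvAny_of_long (s : List Char) : ∀ (cur : List Char), 4 < cur.length →
    (PySem.Chars.split₀.go s cur []).any (fun w => decide (4 < w.length)) = true := by
  induction s with
  | nil =>
      intro cur h
      have hne : cur.isEmpty = false := by
        cases cur with
        | nil => simp at h
        | cons a t => simp
      rw [PySem.Chars.split₀.go.eq_1]
      simp [hne, h]
  | cons c s ih =>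
      intro cur h
      have hne : cur.isEmpty = false := by
        cases cur with
        | nil => simp at h
        | cons a t => simp
      rw [PySem.Chars.split₀.go.eq_2]
      by_cases hs : PySem.Chars.isspace c
      · simp only [hs, hne, if_true, Bool.false_eq_true, if_false]
        rw [pvGo_acc]
        simp [h]
      · simp only [hs, Bool.false_eq_true, if_false]
        apply ih
        simp only [List.length_cons]; omega

theorem pvMain (l : List Char) : ∀ (cur : List Char) (m : Int), (cur.length : Int) ≤ m →
    ((4 < (l.foldl
        (fun (p : Int × Int) c =>
          if pvConsonants.contains c then (max p.1 (p.2 + 1), p.2 + 1) else (p.1, 0))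
        (m, (cur.length : Int))).1)
      ↔ (4 < m ∨ (PySem.Chars.split₀.go
            (l.map (fun c => if pvConsonants.contains c then c else ' ')) cur []).any
            (fun w => decide (4 < w.length)) = true)) := by
  induction l with
  | nil =>
      intro cur m hm
      simp only [List.foldl_nil, List.map_nil]
      rw [PySem.Chars.split₀.go.eq_1]
      by_cases h : cur.isEmpty
      · simp [h]
      · have hlen : cur.length ≠ 0 := by
          cases cur with
          | nil => simp at h
          | cons a t => simp
        constructor
        · intro hh; exact Or.inl hh
        · intro hh
          rcases hh with hh | hh
          · exact hh
          · simp [h] at hh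
            have : (4 : Int) < cur.length := by exact_mod_cast hh
            omega
  | cons c l ih =>
      intro cur m hm
      by_cases hc : pvConsonants.contains c = true
      · have hns := pvCons_not_space c hc
        simp only [List.foldl_cons, List.map_cons, hc, if_true]
        have hgo : PySem.Chars.split₀.go
            (c :: l.map (fun c => if pvConsonants.contains c then c else ' ')) cur []
            = PySem.Chars.split₀.go
            (l.map (fun c => if pvConsonants.contains c then c else ' ')) (c :: cur) [] := by
          rw [PySem.Chars.split₀.go.eq_2]
          simp only [hns, Bool.false_eq_true, if_false]
        rw [hgo]
        have hm' : ((c :: cur).length : Int) ≤ max m ((cur.length : Int) + 1) := by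
          simp only [List.length_cons]; push_cast; omega
        have hmax := ih (c :: cur) (max m ((cur.length : Int) + 1)) hm'
        simp only [List.length_cons, Nat.cast_add, Nat.cast_one] at hmax ⊢
        rw [hmax]
        constructor
        · intro hh
          rcases hh with hh | hh
          · rcases lt_or_ge 4 m with h4 | h4
            · exact Or.inl h4
            · have h5 : 4 < (c :: cur).length := by
                simp only [List.length_cons]; omega
              exact Or.inr (pvAny_of_long _ (c :: cur) h5)
          · exact Or.inr hh
        · intro hh
          rcases hh with hh | hh
          · exact Or.inl (by omega)
          · exact Or.inr hh
      · have hc' : pvConsonants.contains c = false := by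
          cases h : pvConsonants.contains c
          · rfl
          · exact absurd h hc
        simp only [List.foldl_cons, List.map_cons, hc', Bool.false_eq_true, if_false]
        have hsp : PySem.Chars.isspace ' ' = true := by decide
        have hgo : PySem.Chars.split₀.go
            (' ' :: l.map (fun c => if pvConsonants.contains c then c else ' ')) cur []
            = (if cur.isEmpty then [] else [cur.reverse])
              ++ PySem.Chars.split₀.go
                (l.map (fun c => if pvConsonants.contains c then c else ' ')) [] [] := by
          rw [PySem.Chars.split₀.go.eq_2]
          simp only [hsp, if_true]
          by_cases h : cur.isEmpty
          · simp [h]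
          · simp only [h, Bool.false_eq_true, if_false]
            rw [pvGo_acc]
            simp
        rw [hgo]
        have hm0 : ((([] : List Char).length : Int)) ≤ m := by
          simp only [List.length_nil, Nat.cast_zero]; omega
        have hnil := ih [] m hm0
        simp only [List.length_nil, Nat.cast_zero] at hnil
        rw [hnil]
        by_cases h : cur.isEmpty
        · simp [h]
        · have hlen : cur.length ≠ 0 := by
            cases cur with
            | nil => simp at h
            | cons a t => simp
          simp only [h, Bool.false_eq_true, if_false, List.any_append, List.any_cons,
            List.any_nil, Bool.or_false, List.length_reverse]
          constructor
          · intro hh; rcases hh with hh | hh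
            · exact Or.inl hh
            · exact Or.inr (by rw [Bool.or_eq_true_iff]; exact Or.inr hh)
          · intro hh
            rcases hh with hh | hh
            · exact Or.inl hh
            · rcases Bool.or_eq_true_iff.mp hh with hh | hh
              · have : (4 : Int) < cur.length := by
                  have := of_decide_eq_true hh
                  exact_mod_cast this
                exact Or.inl (by omega)
              · exact Or.inr hh

-- ===== VERDICT (by name: the statement is the Claim_ definition above) =====
theorem has_random_pattern_py_spec : Claim_equal_has_random_pattern_py := by
  intro text _
  unfold Spec_has_random_pattern_py has_random_pattern_py has_random_pattern_py_alt
  by_cases hlen : PySem.Str.len text < 5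
  · rw [if_pos hlen, if_pos hlen]
  · rw [if_neg hlen, if_neg hlen]
    have h := pvMain ((PySem.Str.lower text).toList) [] 0 (by simp)
    simp only [List.length_nil, Nat.cast_zero] at h
    simp only [PySem.Chars.split₀]
    rw [Bool.eq_iff_iff]
    simp only [decide_eq_true_eq]
    rw [h]
    constructor
    · intro hh
      rcases hh with hh | hh
      · omega
      · exact hh
    · intro hh; exact Or.inr hh
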